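-- pv_equiv track=rewrite | github.com/whyj107/TIL | 2022/20220216_Around Fibonacci chunks and counts.py | around_fib
-- ===== SOURCE A (Python) =====
-- def around_fib(n):
--     fibo1, fibo2 = 0, 1
--     for i in range(n-1):
--         fibo1, fibo2 = fibo2, fibo1+fibo2
--
--     fibo_n = str(fibo2)
--     lc_idx = len(fibo_n) % 25 if len(fibo_n)%25 != 0 else 25
--     last_chunk = fibo_n[-lc_idx:]
--
--     digit_n, max_n = 0, fibo_n.count('0')
--     for i in range(1, 10):
--         tmp = fibo_n.count(str(i))
--         if max_n < tmp:
--             digit_n = i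
--             max_n = tmp
--     return f'Last chunk {last_chunk}; Max is { max_n } for digit { digit_n }'
-- ===== SOURCE B (Python) =====
-- def _fd(k):
--     # fast-doubling: returns (F(k), F(k+1))
--     if k == 0:
--         return (0, 1)
--     a, b = _fd(k // 2)
--     c = a * (2 * b - a)
--     d = a * a + b * b
--     if k % 2 == 1:
--         return (d, c + d)
--     return (c, d)
--
--
-- def around_fib(n):
--     fib = _fd(max(n, 1))[0]
--     s = str(fib)
--     chunk = s[(len(s) - 1) // 25 * 25:]
--     cnt = {}
--     for ch in s:
--         cnt[ch] = cnt.get(ch, 0) + 1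
--     digit, best = 0, cnt.get('0', 0)
--     for d in range(1, 10):
--         t = cnt.get(str(d), 0)
--         if best < t:
--             digit, best = d, t
--     return f'Last chunk {chunk}; Max is {best} for digit {digit}'
-- ===== Notes on version B (the rewrite author's own statement) =====
-- stated objective: faster
-- what changed: Replaces the O(n) big-int addition loop (O(n^2) bit work) with fast-doubling Fibonacci, and replaces ten separate str.count scans with one dict-counting pass over the digit string.
import Mathlib
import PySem

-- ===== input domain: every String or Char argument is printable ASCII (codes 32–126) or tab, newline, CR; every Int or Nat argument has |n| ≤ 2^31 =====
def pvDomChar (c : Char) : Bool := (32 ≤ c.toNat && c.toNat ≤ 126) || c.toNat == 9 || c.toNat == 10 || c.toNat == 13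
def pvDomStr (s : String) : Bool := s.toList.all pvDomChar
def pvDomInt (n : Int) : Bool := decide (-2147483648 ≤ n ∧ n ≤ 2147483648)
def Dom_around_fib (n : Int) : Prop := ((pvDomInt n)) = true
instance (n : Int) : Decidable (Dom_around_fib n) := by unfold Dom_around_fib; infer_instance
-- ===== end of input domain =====

-- B replaces the quadratic iterative Fibonacci loop by fast doubling and the ten
-- per-digit string scans by a single dict-counting pass (objective: faster).


-- ===== PORT A =====
-- literal port of A: iterate (fibo1, fibo2) = (fibo2, fibo1+fibo2) over range(n-1),
-- then str(fibo2), the negative-index slice, and the ten-digit count loop.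
def around_fib (n : Int) : String :=
  let p := (PySem.List.pyRange 0 (n - 1) 1).foldl
      (fun (q : Int × Int) _ => (q.2, q.1 + q.2)) (0, 1)
  let fibo_n := PySem.Int.toChars p.2
  let lc_idx : Int :=
    if PySem.Int.mod (PySem.List.len fibo_n) 25 ≠ 0 then
      PySem.Int.mod (PySem.List.len fibo_n) 25
    else 25
  let last_chunk := PySem.List.slice fibo_n (some (-lc_idx)) none
  let st := (PySem.List.pyRange 1 10 1).foldl
      (fun (st : Int × Int) i =>
        let tmp : Int := PySem.Chars.count fibo_n (PySem.Int.toChars i)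
        if st.2 < tmp then (i, tmp) else st)
      (0, (PySem.Chars.count fibo_n (PySem.Int.toChars 0) : Int))
  "Last chunk " ++ String.ofList last_chunk ++ "; Max is " ++ PySem.Int.toStr st.2
    ++ " for digit " ++ PySem.Int.toStr st.1

-- ===== PORT B =====
-- fast-doubling helper of Source B: returns (F(k), F(k+1))
def fdAux : Nat → Int × Int
  | 0 => (0, 1)
  | (k + 1) =>
      let p := fdAux ((k + 1) / 2)
      let a := p.1
      let b := p.2
      let c := a * (2 * b - a)
      let d := a * a + b * b
      if (k + 1) % 2 = 1 then (d, c + d) else (c, d)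
termination_by k => k
decreasing_by omega

def around_fib_alt (n : Int) : String :=
  let fib := (fdAux (max n 1).toNat).1
  let s := PySem.Int.toChars fib
  let chunk := PySem.List.slice s
      (some (PySem.Int.floordiv (PySem.List.len s - 1) 25 * 25)) none
  let cnt := s.foldl
      (fun (d : PySem.Dict (List Char) Int) ch => d.insert [ch] (d.getD [ch] 0 + 1))
      PySem.Dict.empty
  let st := (PySem.List.pyRange 1 10 1).foldl
      (fun (st : Int × Int) d =>
        let t := cnt.getD (PySem.Int.toChars d) 0
        if st.2 < t then (d, t) else st)
      (0, cnt.getD (PySem.Int.toChars 0) 0)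
  "Last chunk " ++ String.ofList chunk ++ "; Max is " ++ PySem.Int.toStr st.2
    ++ " for digit " ++ PySem.Int.toStr st.1

-- ===== PRECONDITION & SPEC =====
def Spec_around_fib (n : Int) (out : String) : Prop := out = around_fib_alt n
instance (n : Int) (out : String) : Decidable (Spec_around_fib n out) := by unfold Spec_around_fib; infer_instance

-- ===== CLAIM (what is proved, stated in full; the proofs are below) =====
def Claim_equal_around_fib : Prop := ∀ (n : Int), Dom_around_fib n → Spec_around_fib n (around_fib n)

-- ===== LEMMAS AND PROOFS =====

-- A's loop after k steps starting from (fib m, fib (m+1)).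
theorem fib_foldl {α : Type} (l : List α) (m : Nat) :
    l.foldl (fun (q : Int × Int) _ => (q.2, q.1 + q.2)) ((Nat.fib m : Int), (Nat.fib (m + 1) : Int))
      = ((Nat.fib (m + l.length) : Int), (Nat.fib (m + l.length + 1) : Int)) := by
  induction l generalizing m with
  | nil => simp
  | cons x xs ih =>
      simp only [List.foldl_cons]
      have : ((Nat.fib (m + 1) : Int), (Nat.fib m : Int) + (Nat.fib (m + 1) : Int))
          = ((Nat.fib (m + 1) : Int), (Nat.fib (m + 1 + 1) : Int)) := by
        have h2 := Nat.fib_add_two (n := m)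
        rw [h2]; push_cast; ring_nf
      rw [this, ih (m + 1)]
      have e : m + 1 + xs.length = m + (x :: xs).length := by
        simp [List.length_cons]; omega
      rw [e]

-- fast doubling computes (fib k, fib (k+1))
theorem fdAux_eq (k : Nat) : fdAux k = ((Nat.fib k : Int), (Nat.fib (k + 1) : Int)) := by
  induction k using Nat.strong_induction_on with
  | _ k ih =>
    match k with
    | 0 => simp [fdAux]
    | (k + 1) =>
      rw [fdAux]
      rw [ih ((k + 1) / 2) (by omega)]
      set h := (k + 1) / 2 with hh
      have hfle : Nat.fib h ≤ 2 * Nat.fib (h + 1) := by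
        have := Nat.fib_le_fib_succ (n := h); omega
      have hc : (Nat.fib h : Int) * (2 * (Nat.fib (h + 1) : Int) - (Nat.fib h : Int))
          = (Nat.fib (2 * h) : Int) := by
        rw [Nat.fib_two_mul]; push_cast [hfle]; ring
      have hd : (Nat.fib h : Int) * (Nat.fib h : Int) + (Nat.fib (h + 1) : Int) * (Nat.fib (h + 1) : Int)
          = (Nat.fib (2 * h + 1) : Int) := by
        rw [Nat.fib_two_mul_add_one]; push_cast; ring
      by_cases hodd : (k + 1) % 2 = 1
      · have hk : k + 1 = 2 * h + 1 := by omega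
        have h2 : (Nat.fib (2 * h) : Int) + (Nat.fib (2 * h + 1) : Int)
            = (Nat.fib (2 * h + 2) : Int) := by
          have := Nat.fib_add_two (n := 2 * h); push_cast [this]; ring
        simp only [hc, hd, h2, hk]
        norm_num
      · have hk : k + 1 = 2 * h := by omega
        have h2 : (Nat.fib (2 * h) : Int) + (Nat.fib (2 * h + 1) : Int)
            = (Nat.fib (2 * h + 2) : Int) := by
          have := Nat.fib_add_two (n := 2 * h); push_cast [this]; ring
        simp only [hk, hc, hd]
        rw [if_neg (by omega)]

-- str(m) for m < 10 is the single digit character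
theorem toDigits_lt_ten (m : Nat) (h : m < 10) :
    Nat.toDigits 10 m = [Nat.digitChar m] := by
  interval_cases m <;> decide

-- str(i) of a small nonnegative Int
theorem toChars_small (i : Int) (h0 : 0 ≤ i) (h10 : i < 10) :
    PySem.Int.toChars i = [Nat.digitChar i.toNat] := by
  rw [PySem.Int.toChars, if_neg (by omega)]
  exact toDigits_lt_ten i.toNat (by omega)

-- decimal strings are nonempty
theorem toDigitsCore_len_pos (fuel n : Nat) (l : List Char) :
    0 < (Nat.toDigitsCore 10 (fuel + 1) n l).length := by
  rw [Nat.toDigitsCore]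
  split
  · simp
  · rw [Nat.toDigitsCore_lens_eq]; omega

theorem toDigits_ne_nil (m : Nat) : Nat.toDigits 10 m ≠ [] := by
  rw [Nat.toDigits]
  have := toDigitsCore_len_pos m m []
  intro h
  rw [h] at this
  simp at this

-- substring count of a single character is character count
theorem count_go_single (c : Char) (l : List Char) : ∀ (fuel acc : Nat), l.length ≤ fuel →
    PySem.Chars.count.go [c] fuel l acc = acc + l.count c := by
  induction l with
  | nil => intro fuel acc h; cases fuel <;> simp [PySem.Chars.count.go]
  | cons x t ih =>
      intro fuel acc h
      match fuel with
      | fuel + 1 =>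
        rw [PySem.Chars.count.go]
        have hlen : t.length ≤ fuel := by simp at h; omega
        by_cases hx : c = x
        · subst hx
          simp only [List.isPrefixOf, BEq.rfl, Bool.true_and, if_true]
          simp only [List.length_singleton, List.drop_one, List.tail_cons]
          rw [ih fuel (acc + 1) hlen]
          simp
          omega
        · rw [if_neg]
          · rw [ih fuel acc hlen]
            simp [List.count_cons]
            intro hh; first | exact absurd hh hx | exact absurd hh.symm hx
          · simp [List.isPrefixOf]
            intro hh; exact hx hh

theorem chars_count_single (s : List Char) (c : Char) :
    PySem.Chars.count s [c] = s.count c := by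
  unfold PySem.Chars.count
  rw [if_neg (by simp)]
  simpa using count_go_single c s s.length 0 le_rfl

-- the dict-counting pass counts characters
theorem cnt_getD (s : List Char) (c : Char) :
    (s.foldl (fun (d : PySem.Dict (List Char) Int) ch => d.insert [ch] (d.getD [ch] 0 + 1))
        PySem.Dict.empty).getD [c] 0 = (s.count c : Int) := by
  have hmap : s.foldl (fun (d : PySem.Dict (List Char) Int) ch => d.insert [ch] (d.getD [ch] 0 + 1))
        PySem.Dict.empty
      = (s.map (fun ch => [ch])).foldl (fun d x => d.insert x (d.getD x 0 + 1)) PySem.Dict.empty := by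
    rw [List.foldl_map]
  rw [hmap, PySem.Dict.getD_foldl_insert_add_one]
  have hcm : (s.map (fun ch => [ch])).count [c] = s.count c := by
    have hinj : Function.Injective (fun ch : Char => [ch]) := by
      intro a b hab; simpa using hab
    have := List.count_map_of_injective s (fun ch : Char => [ch]) hinj c
    simpa using this
  simp [hcm]

-- the two chunk slices agree on a nonempty string
theorem chunk_eq (s : List Char) (hs : s ≠ []) :
    PySem.List.slice s
      (some (-(if PySem.Int.mod (PySem.List.len s) 25 ≠ 0 then PySem.Int.mod (PySem.List.len s) 25 else 25)))
      none
    = PySem.List.slice s (some (PySem.Int.floordiv (PySem.List.len s - 1) 25 * 25)) none := by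
  have hL : 1 ≤ s.length := List.length_pos_iff.mpr hs
  have hlen : PySem.List.len s = (s.length : Int) := PySem.List.len_eq s
  have hmod : PySem.Int.mod (PySem.List.len s) 25 = (s.length : Int) % 25 := by
    rw [hlen]; simp [pysem]
  have hdiv : PySem.Int.floordiv (PySem.List.len s - 1) 25 = ((s.length : Int) - 1) / 25 := by
    rw [hlen]; simp [pysem]
  set lc : Int := if PySem.Int.mod (PySem.List.len s) 25 ≠ 0 then PySem.Int.mod (PySem.List.len s) 25 else 25 with hlc
  have hlcb : 1 ≤ lc ∧ lc ≤ (s.length : Int) := by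
    rw [hlc, hmod]
    split <;> constructor <;> omega
  have hk : -lc = -((lc.toNat : Nat) : Int) := by omega
  rw [hdiv, hk, PySem.List.slice_from_neg_natCast s lc.toNat (by omega),
    PySem.List.slice_from s (by omega)]
  congr 1
  have hcase : lc = (s.length : Int) % 25 ∨ ((s.length : Int) % 25 = 0 ∧ lc = 25) := by
    rw [hlc, hmod]; split <;> simp_all
  rcases hcase with h | h <;> omega

-- ===== VERDICT (by name: the statement is the Claim_ definition above) =====
theorem around_fib_spec : Claim_equal_around_fib := by
  intro n _
  unfold Spec_around_fib around_fib around_fib_alt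
  set F : Nat := (max n 1).toNat with hF
  -- A's loop computes fib F
  have hstart : ((0 : Int), (1 : Int)) = ((Nat.fib 0 : Int), (Nat.fib (0 + 1) : Int)) := by
    norm_num
  have hA : (PySem.List.pyRange 0 (n - 1) 1).foldl
      (fun (q : Int × Int) _ => (q.2, q.1 + q.2)) (0, 1)
      = ((Nat.fib ((n - 1).toNat) : Int), (Nat.fib F : Int)) := by
    rw [hstart, fib_foldl]
    have hl : (PySem.List.pyRange 0 (n - 1) 1).length = (n - 1).toNat := by
      simp [PySem.List.length_pyRange_one 0 (n - 1)]
    rw [hl]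
    have h0 : 0 + (n - 1).toNat = (n - 1).toNat := by omega
    have hFl : (n - 1).toNat + 1 = F := by omega
    rw [h0, hFl]
  have hB : fdAux F = ((Nat.fib F : Int), (Nat.fib (F + 1) : Int)) := fdAux_eq F
  rw [hA, hB]
  dsimp only
  -- the common digit string
  have hm : 0 < Nat.fib F := Nat.fib_pos.mpr (by omega)
  have hsstr : PySem.Int.toChars ((Nat.fib F : Int)) = Nat.toDigits 10 (Nat.fib F) := by
    rw [PySem.Int.toChars, if_neg (by omega)]
    norm_num
  set s : List Char := PySem.Int.toChars ((Nat.fib F : Int)) with hsdef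
  have hsne : s ≠ [] := by rw [hsstr]; exact toDigits_ne_nil _
  -- chunks agree
  rw [chunk_eq s hsne]
  -- counting loops agree
  have hcount : ∀ i : Int, 0 ≤ i → i < 10 →
      (PySem.Chars.count s (PySem.Int.toChars i) : Int)
        = (s.foldl (fun (d : PySem.Dict (List Char) Int) ch => d.insert [ch] (d.getD [ch] 0 + 1))
            PySem.Dict.empty).getD (PySem.Int.toChars i) 0 := by
    intro i h0 h10
    rw [toChars_small i h0 h10, chars_count_single, cnt_getD]
  have hfold : (PySem.List.pyRange 1 10 1).foldl
      (fun (st : Int × Int) i =>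
        if st.2 < (PySem.Chars.count s (PySem.Int.toChars i) : Int)
        then (i, (PySem.Chars.count s (PySem.Int.toChars i) : Int)) else st)
      (0, (PySem.Chars.count s (PySem.Int.toChars 0) : Int))
      = (PySem.List.pyRange 1 10 1).foldl
      (fun (st : Int × Int) d =>
        if st.2 < (s.foldl (fun (dd : PySem.Dict (List Char) Int) ch => dd.insert [ch] (dd.getD [ch] 0 + 1))
            PySem.Dict.empty).getD (PySem.Int.toChars d) 0
        then (d, (s.foldl (fun (dd : PySem.Dict (List Char) Int) ch => dd.insert [ch] (dd.getD [ch] 0 + 1))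
            PySem.Dict.empty).getD (PySem.Int.toChars d) 0) else st)
      (0, (s.foldl (fun (dd : PySem.Dict (List Char) Int) ch => dd.insert [ch] (dd.getD [ch] 0 + 1))
            PySem.Dict.empty).getD (PySem.Int.toChars 0) 0) := by
    rw [hcount 0 (by norm_num) (by norm_num)]
    apply PySem.List.foldl_congr_mem
    intro acc x hx
    have hxr := PySem.List.mem_pyRange_one.mp hx
    rw [hcount x (by omega) (by omega)]
  simp only [hfold]
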